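-- pv_equiv track=rewrite | github.com/wilmurillo-ai/Design-Assistant | .skills/openclaw-skills/skills/tarun-khatri/depradar/scripts/lib/dep_parser.py | _split_toml_array
-- ===== SOURCE A (Python) =====
-- from typing import Dict, List, Optional, Tuple
--
-- def _split_toml_array(s: str) -> List[str]:
--     """Split a comma-separated TOML array/table body respecting nesting."""
--     items = []
--     depth = 0
--     current = []
--     for ch in s:
--         if ch in ("{", "["):
--             depth += 1
--             current.append(ch)
--         elif ch in ("}", "]"):
--             depth -= 1
--             current.append(ch)
--         elif ch == "," and depth == 0:
--             items.append("".join(current).strip())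
--             current = []
--         else:
--             current.append(ch)
--     if current:
--         item = "".join(current).strip()
--         if item:
--             items.append(item)
--     return items
-- ===== SOURCE B (Python) =====
-- from typing import List
--
--
-- def _split_toml_array(s: str) -> List[str]:
--     """Split a comma-separated TOML array/table body respecting nesting.
--
--     Splits on every comma first, then re-joins tokens whose running
--     bracket balance is unresolved."""
--     parts = s.split(',')
--     items = []
--     buf = []
--     bal = 0
--     for tok in parts[:-1]:
--         buf.append(tok)
--         bal += tok.count('{') + tok.count('[') - tok.count('}') - tok.count(']')
--         if bal == 0:
--             items.append(','.join(buf).strip())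
--             buf = []
--     tail = ','.join(buf + parts[-1:]).strip()
--     if tail:
--         items.append(tail)
--     return items
-- ===== Notes on version B (the rewrite author's own statement) =====
-- stated objective: faster
-- what changed: B replaces A's single character-by-character scan with depth tracking by splitting the string on every comma first and then re-joining consecutive tokens whose running bracket balance (computed from per-token bracket counts) is unresolved.
import Mathlib
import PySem

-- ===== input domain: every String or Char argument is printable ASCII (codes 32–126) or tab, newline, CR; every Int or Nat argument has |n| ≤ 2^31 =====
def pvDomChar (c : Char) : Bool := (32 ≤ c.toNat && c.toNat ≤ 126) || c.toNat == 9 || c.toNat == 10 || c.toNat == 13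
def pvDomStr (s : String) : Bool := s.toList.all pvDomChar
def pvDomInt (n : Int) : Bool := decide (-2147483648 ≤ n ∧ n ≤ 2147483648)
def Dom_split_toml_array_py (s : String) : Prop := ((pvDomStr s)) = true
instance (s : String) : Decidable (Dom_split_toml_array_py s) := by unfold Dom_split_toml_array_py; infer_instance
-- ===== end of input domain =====

-- B re-implements A by a different decomposition: split on every comma first, then re-join
-- tokens whose running bracket balance is unresolved (measured faster by a constant factor).

-- ===== PORT A =====
-- one iteration of A's character loop (state: items, depth, current)
def pvStepA (st : List String × Int × List Char) (ch : Char) : List String × Int × List Char :=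
  if ch = '{' ∨ ch = '[' then (st.1, st.2.1 + 1, st.2.2 ++ [ch])
  else if ch = '}' ∨ ch = ']' then (st.1, st.2.1 - 1, st.2.2 ++ [ch])
  else if ch = ',' ∧ st.2.1 = 0 then
    (st.1 ++ [PySem.Str.strip (String.ofList st.2.2)], st.2.1, [])
  else (st.1, st.2.1, st.2.2 ++ [ch])

def split_toml_array_py (s : String) : List String :=
  let st := s.toList.foldl pvStepA ([], 0, [])
  if st.2.2 ≠ [] then
    let item := PySem.Str.strip (String.ofList st.2.2)
    if item ≠ "" then st.1 ++ [item] else st.1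
  else st.1

-- ===== PORT B =====
-- tok.count('{') + tok.count('[') - tok.count('}') - tok.count(']')
def pvTokBal (tok : String) : Int :=
  (PySem.Str.count tok "{" : Int) + (PySem.Str.count tok "[" : Int)
    - (PySem.Str.count tok "}" : Int) - (PySem.Str.count tok "]" : Int)

-- one iteration of B's token loop (state: items, buf, bal)
def pvStepB (st : List String × List String × Int) (tok : String) : List String × List String × Int :=
  let buf := st.2.1 ++ [tok]
  let bal := st.2.2 + pvTokBal tok
  if bal = 0 then (st.1 ++ [PySem.Str.strip (PySem.Str.join "," buf)], ([] : List String), bal)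
  else (st.1, buf, bal)

def split_toml_array_py_alt (s : String) : List String :=
  let parts := (PySem.Str.split? s ",").getD []   -- sep "," is non-empty, so split? is always `some`
  let st := (PySem.List.slice parts none (some (-1))).foldl pvStepB ([], [], 0)
  let tail := PySem.Str.strip (PySem.Str.join "," (st.2.1 ++ PySem.List.slice parts (some (-1)) none))
  if tail ≠ "" then st.1 ++ [tail] else st.1

-- ===== PRECONDITION & SPEC =====
def Spec_split_toml_array_py (s : String) (out : List String) : Prop := out = split_toml_array_py_alt s
instance (s : String) (out : List String) : Decidable (Spec_split_toml_array_py s out) := by unfold Spec_split_toml_array_py; infer_instance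

-- ===== CLAIM (what is proved, stated in full; the proofs are below) =====
def Claim_equal_split_toml_array_py : Prop := ∀ (s : String), Dom_split_toml_array_py s → Spec_split_toml_array_py s (split_toml_array_py s)

-- ===== LEMMAS AND PROOFS =====

-- s.split(',') characterised structurally
def pvSplitC : List Char → List (List Char)
  | [] => [[]]
  | c :: rest =>
      if c = ',' then [] :: pvSplitC rest
      else match pvSplitC rest with
        | [] => [[c]]
        | t :: ts => (c :: t) :: ts

-- the inverse: tokens re-joined with commas
def pvJoinC : List (List Char) → List Char
  | [] => []
  | [t] => t
  | t :: ts => t ++ ',' :: pvJoinC ts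

def pvConsHead (p : List Char) : List (List Char) → List (List Char)
  | [] => [p]
  | t :: ts => (p ++ t) :: ts

-- net bracket balance of a char / a token / a buffered token list
def pvCharBal (c : Char) : Int :=
  if c = '{' ∨ c = '[' then 1 else if c = '}' ∨ c = ']' then -1 else 0
def pvBalT (t : List Char) : Int := (t.map pvCharBal).sum
def pvBalS (bs : List String) : Int := (bs.map pvTokBal).sum
-- the characters A has buffered when B has buffered the tokens bs
def pvFlat (bs : List String) : List Char := bs.flatMap (fun b => b.toList ++ [','])

-- B's loop phrased as structural recursion on the token list
def pvBrun : List (List Char) → List String → List String → Int → List String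
  | [], items, _, _ => items
  | [t], items, buf, _ =>
      let tail := PySem.Str.strip (PySem.Str.join "," (buf ++ [String.ofList t]))
      if tail ≠ "" then items ++ [tail] else items
  | t :: u :: rest, items, buf, bal =>
      let bal' := bal + pvTokBal (String.ofList t)
      if bal' = 0 then
        pvBrun (u :: rest) (items ++ [PySem.Str.strip (PySem.Str.join "," (buf ++ [String.ofList t]))]) [] 0
      else pvBrun (u :: rest) items (buf ++ [String.ofList t]) bal'

lemma pvSplitC_ne_nil (l : List Char) : pvSplitC l ≠ [] := by
  induction l with
  | nil => simp [pvSplitC]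
  | cons c rest ih =>
    simp only [pvSplitC]
    split
    · simp
    · cases h : pvSplitC rest <;> simp

lemma pvJoin_splitC (l : List Char) : pvJoinC (pvSplitC l) = l := by
  induction l with
  | nil => simp [pvSplitC, pvJoinC]
  | cons c rest ih =>
    simp only [pvSplitC]
    split
    · rename_i hc
      subst hc
      cases h : pvSplitC rest with
      | nil => exact absurd h (pvSplitC_ne_nil rest)
      | cons t ts =>
        rw [h] at ih
        simp only [pvJoinC]
        rw [ih]
        simp
    · rename_i hc
      cases h : pvSplitC rest with
      | nil => exact absurd h (pvSplitC_ne_nil rest)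
      | cons t ts =>
        rw [h] at ih
        cases ts with
        | nil => simp only [pvJoinC] at ih ⊢; rw [ih]
        | cons u us => simp only [pvJoinC] at ih ⊢; rw [List.cons_append, ih]

lemma pvSplitC_no_comma (l : List Char) : ∀ t ∈ pvSplitC l, ',' ∉ t := by
  induction l with
  | nil => intro t ht; simp [pvSplitC] at ht; simp [ht]
  | cons c rest ih =>
    intro t ht
    simp only [pvSplitC] at ht
    by_cases hc : c = ','
    · simp only [if_pos hc, List.mem_cons] at ht
      rcases ht with h | h
      · simp [h]
      · exact ih t h
    · simp only [if_neg hc] at ht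
      cases h : pvSplitC rest with
      | nil => exact absurd h (pvSplitC_ne_nil rest)
      | cons t0 ts =>
        rw [h] at ht
        simp only [List.mem_cons] at ht
        rcases ht with h1 | h1
        · subst h1
          simp only [List.mem_cons, not_or]
          exact ⟨fun hh => hc hh.symm, ih t0 (by rw [h]; exact List.mem_cons_self)⟩
        · exact ih t (by rw [h]; exact List.mem_cons_of_mem _ h1)

lemma pvSplitOn_go (l : List Char) : ∀ (fuel : Nat) (cur : List Char) (acc : List (List Char)),
    l.length < fuel →
    PySem.Chars.splitOn.go [','] fuel l cur acc = acc.reverse ++ pvConsHead cur.reverse (pvSplitC l) := by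
  induction l with
  | nil =>
    intro fuel cur acc h
    cases fuel with
    | zero => omega
    | succ f =>
      rw [PySem.Chars.splitOn.go]
      simp [pvConsHead, pvSplitC]
      omega
  | cons c rest ih =>
    intro fuel cur acc h
    cases fuel with
    | zero => simp at h
    | succ f =>
      rw [PySem.Chars.splitOn.go]
      have hpre : (List.isPrefixOf [','] (c :: rest)) = (',' == c) := by
        simp [List.isPrefixOf]
      rw [hpre]
      by_cases hc : c = ','
      · subst hc
        rw [if_pos (by simp)]
        simp only [List.length_cons, List.length_nil, List.drop_succ_cons, List.drop_zero,
          Nat.zero_add, List.drop_one, List.tail_cons]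
        rw [ih f [] (cur.reverse :: acc) (by simp at h; omega)]
        simp only [pvSplitC, if_pos rfl, List.reverse_cons, List.reverse_nil, List.nil_append]
        cases hs : pvSplitC rest with
        | nil => exact absurd hs (pvSplitC_ne_nil rest)
        | cons t ts => simp [pvConsHead]
      · rw [if_neg (by simp; exact fun hh => hc hh.symm)]
        rw [ih f (c :: cur) acc (by simp at h; omega)]
        simp only [pvSplitC, if_neg hc, List.reverse_cons]
        cases hs : pvSplitC rest with
        | nil => exact absurd hs (pvSplitC_ne_nil rest)
        | cons t ts => simp [pvConsHead]

lemma pvSplitOn_comma (l : List Char) : PySem.Chars.splitOn l [','] = pvSplitC l := by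
  have := pvSplitOn_go l (l.length + 1) [] [] (by omega)
  simp only [PySem.Chars.splitOn] at *
  rw [this]
  simp only [List.reverse_nil, List.nil_append, pvConsHead]
  cases hs : pvSplitC l with
  | nil => exact absurd hs (pvSplitC_ne_nil l)
  | cons t ts => simp [pvConsHead]

lemma pvCount_go (c : Char) (l : List Char) : ∀ (fuel : Nat) (acc : Nat), l.length ≤ fuel →
    PySem.Chars.count.go [c] fuel l acc = acc + l.count c := by
  induction l with
  | nil =>
    intro fuel acc h
    cases fuel with
    | zero => rw [PySem.Chars.count.go]; simp
    | succ f => rw [PySem.Chars.count.go]; simp; omega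
  | cons b rest ih =>
    intro fuel acc h
    cases fuel with
    | zero => simp at h
    | succ f =>
      rw [PySem.Chars.count.go]
      have hpre : (List.isPrefixOf [c] (b :: rest)) = (c == b) := by
        simp [List.isPrefixOf]
      rw [hpre]
      by_cases hb : c = b
      · subst hb
        rw [if_pos (by simp)]
        simp only [List.length_cons, List.length_nil, List.drop_succ_cons, List.drop_zero,
          Nat.zero_add, List.drop_one, List.tail_cons]
        rw [ih f (acc + 1) (by simp at h; omega)]
        simp [List.count_cons]
        omega
      · rw [if_neg (by simp [hb])]
        rw [ih f acc (by simp at h; omega)]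
        simp [List.count_cons, hb]
        intro hh
        exact absurd hh.symm hb

lemma pvCount_single (c : Char) (l : List Char) : PySem.Chars.count l [c] = l.count c := by
  rw [PySem.Chars.count, if_neg (by simp), pvCount_go c l l.length 0 (le_refl _)]
  simp

lemma pvBalT_count (t : List Char) :
    ((t.count '{' : Nat) : Int) + ((t.count '[' : Nat) : Int) - ((t.count '}' : Nat) : Int)
      - ((t.count ']' : Nat) : Int) = pvBalT t := by
  induction t with
  | nil => simp [pvBalT]
  | cons c rest ih =>
    simp only [List.count_cons, pvBalT, List.map_cons, List.sum_cons] at *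
    by_cases a1 : c = '{' <;> by_cases a2 : c = '[' <;> by_cases a3 : c = '}' <;>
      by_cases a4 : c = ']' <;>
      simp_all [pvCharBal] <;> push_cast <;> omega

lemma pvTokBal_eq (t : List Char) : pvTokBal (String.ofList t) = pvBalT t := by
  have hc : ∀ (c : Char), PySem.Str.count (String.ofList t) (String.ofList [c]) = t.count c := by
    intro c
    rw [PySem.Str.count]
    simp only [String.toList_ofList]
    exact pvCount_single c t
  simp only [pvTokBal]
  rw [show ("{" : String) = String.ofList ['{'] from rfl,
      show ("[" : String) = String.ofList ['['] from rfl,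
      show ("}" : String) = String.ofList ['}'] from rfl,
      show ("]" : String) = String.ofList [']'] from rfl,
      hc '{', hc '[', hc '}', hc ']']
  exact pvBalT_count t

-- A's loop over one comma-free token
lemma pvA_token (t : List Char) (h : ',' ∉ t) (items : List String) (d : Int) (cur : List Char) :
    t.foldl pvStepA (items, d, cur) = (items, d + pvBalT t, cur ++ t) := by
  induction t generalizing d cur with
  | nil => simp [pvBalT]
  | cons c rest ih =>
    simp only [List.mem_cons, not_or] at h
    obtain ⟨hc, hrest⟩ := h
    simp only [List.foldl_cons]
    by_cases a1 : c = '{' ∨ c = '['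
    · rw [show pvStepA (items, d, cur) c = (items, d + 1, cur ++ [c]) by
        simp [pvStepA, a1]]
      rw [ih hrest]
      simp [pvBalT, pvCharBal, a1]
      omega
    · by_cases a2 : c = '}' ∨ c = ']'
      · rw [show pvStepA (items, d, cur) c = (items, d - 1, cur ++ [c]) by
          simp [pvStepA, a1, a2]]
        rw [ih hrest]
        simp [pvBalT, pvCharBal, a1, a2]
        omega
      · rw [show pvStepA (items, d, cur) c = (items, d, cur ++ [c]) by
          simp only [pvStepA]
          rw [if_neg a1, if_neg a2, if_neg (fun hh => hc hh.1.symm)]]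
        rw [ih hrest]
        simp [pvBalT, pvCharBal, a1, a2]

lemma pvFlat_join (bs : List String) (t : List Char) :
    pvFlat bs ++ t = PySem.Chars.join [','] (bs.map String.toList ++ [t]) := by
  induction bs with
  | nil => simp [pvFlat, PySem.Chars.join_singleton]
  | cons b bs ih =>
    cases bs with
    | nil =>
      simp only [pvFlat, List.flatMap_cons, List.flatMap_nil, List.append_nil, List.map_cons,
        List.map_nil, List.nil_append, List.cons_append]
      rw [PySem.Chars.join_cons_cons, PySem.Chars.join_singleton]
    | cons b2 bs2 =>
      simp only [List.map_cons, List.cons_append] at ih ⊢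
      rw [PySem.Chars.join_cons_cons, ← ih]
      simp [pvFlat, List.append_assoc]

lemma pvStrip_flat (bs : List String) (t : List Char) :
    PySem.Str.strip (String.ofList (pvFlat bs ++ t))
      = PySem.Str.strip (PySem.Str.join "," (bs ++ [String.ofList t])) := by
  have : String.ofList (pvFlat bs ++ t) = PySem.Str.join "," (bs ++ [String.ofList t]) := by
    rw [PySem.Str.join]
    congr 1
    rw [pvFlat_join]
    congr 1
    simp [String.toList_ofList]
  rw [this]

lemma pvBalS_append (bs : List String) (x : String) :
    pvBalS (bs ++ [x]) = pvBalS bs + pvTokBal x := by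
  simp [pvBalS]

lemma pvFlat_append (bs : List String) (x : String) :
    pvFlat (bs ++ [x]) = pvFlat bs ++ x.toList ++ [','] := by
  simp [pvFlat]

-- A's whole run (from a buffered state) equals B's token recursion
lemma pvBrun_cons_cons (t u : List Char) (rest : List (List Char)) (items buf : List String)
    (bal : Int) :
    pvBrun (t :: u :: rest) items buf bal =
      if bal + pvTokBal (String.ofList t) = 0 then
        pvBrun (u :: rest)
          (items ++ [PySem.Str.strip (PySem.Str.join "," (buf ++ [String.ofList t]))]) [] 0
      else pvBrun (u :: rest) items (buf ++ [String.ofList t]) (bal + pvTokBal (String.ofList t)) := by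
  rfl

lemma pvMain (ts : List (List Char)) (hne : ts ≠ []) (hcf : ∀ t ∈ ts, ',' ∉ t)
    (items buf : List String) :
    (if (((pvJoinC ts).foldl pvStepA (items, pvBalS buf, pvFlat buf)).2.2 ≠ []) then
       (if PySem.Str.strip (String.ofList
              (((pvJoinC ts).foldl pvStepA (items, pvBalS buf, pvFlat buf)).2.2)) ≠ "" then
          ((pvJoinC ts).foldl pvStepA (items, pvBalS buf, pvFlat buf)).1
            ++ [PySem.Str.strip (String.ofList
                (((pvJoinC ts).foldl pvStepA (items, pvBalS buf, pvFlat buf)).2.2))]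
        else ((pvJoinC ts).foldl pvStepA (items, pvBalS buf, pvFlat buf)).1)
     else ((pvJoinC ts).foldl pvStepA (items, pvBalS buf, pvFlat buf)).1)
    = pvBrun ts items buf (pvBalS buf) := by
  induction ts generalizing items buf with
  | nil => exact absurd rfl hne
  | cons t rest ih =>
    cases rest with
    | nil =>
      rw [show pvJoinC [t] = t from rfl]
      rw [pvA_token t (hcf t (by simp)) items (pvBalS buf) (pvFlat buf)]
      simp only [pvBrun]
      rw [← pvStrip_flat buf t]
      by_cases hc : pvFlat buf ++ t = []
      · rw [hc]
        simp
        decide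
      · rw [if_pos hc]
    | cons u rest2 =>
      rw [show pvJoinC (t :: u :: rest2) = t ++ ',' :: pvJoinC (u :: rest2) from rfl]
      rw [List.foldl_append]
      rw [pvA_token t (hcf t (by simp)) items (pvBalS buf) (pvFlat buf)]
      simp only [List.foldl_cons]
      rw [pvBrun_cons_cons, pvTokBal_eq]
      by_cases hd : pvBalS buf + pvBalT t = 0
      · rw [show pvStepA (items, pvBalS buf + pvBalT t, pvFlat buf ++ t) ','
              = (items ++ [PySem.Str.strip (String.ofList (pvFlat buf ++ t))],
                 pvBalS buf + pvBalT t, []) by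
            simp only [pvStepA]
            rw [if_neg (by decide), if_neg (by decide), if_pos ⟨by trivial, hd⟩]]
        rw [if_pos hd, ← pvStrip_flat buf t, hd]
        have hih := ih (by simp) (fun x hx => hcf x (List.mem_cons_of_mem _ hx))
          (items ++ [PySem.Str.strip (String.ofList (pvFlat buf ++ t))]) []
        simpa [pvBalS, pvFlat] using hih
      · rw [show pvStepA (items, pvBalS buf + pvBalT t, pvFlat buf ++ t) ','
              = (items, pvBalS buf + pvBalT t, pvFlat buf ++ t ++ [',']) by
            simp only [pvStepA]
            rw [if_neg (by decide), if_neg (by decide), if_neg (fun hh => hd hh.2)]]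
        rw [if_neg hd]
        have hih := ih (by simp) (fun x hx => hcf x (List.mem_cons_of_mem _ hx))
          items (buf ++ [String.ofList t])
        rw [pvBalS_append, pvTokBal_eq, pvFlat_append] at hih
        simp only [String.toList_ofList] at hih
        exact hih

-- B's port equals the token recursion
lemma pvBrun_spec (ts : List (List Char)) (hne : ts ≠ []) (items buf : List String) (bal : Int) :
    (if PySem.Str.strip (PySem.Str.join ","
          (((ts.map String.ofList).dropLast.foldl pvStepB (items, buf, bal)).2.1
            ++ (ts.map String.ofList).drop ((ts.map String.ofList).length - 1))) ≠ "" then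
       ((ts.map String.ofList).dropLast.foldl pvStepB (items, buf, bal)).1
         ++ [PySem.Str.strip (PySem.Str.join ","
              (((ts.map String.ofList).dropLast.foldl pvStepB (items, buf, bal)).2.1
                ++ (ts.map String.ofList).drop ((ts.map String.ofList).length - 1)))]
     else ((ts.map String.ofList).dropLast.foldl pvStepB (items, buf, bal)).1)
    = pvBrun ts items buf bal := by
  induction ts generalizing items buf bal with
  | nil => exact absurd rfl hne
  | cons t rest ih =>
    cases rest with
    | nil => rfl
    | cons u rest2 =>
      rw [show (List.map String.ofList (t :: u :: rest2)) =
            String.ofList t :: List.map String.ofList (u :: rest2) from rfl]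
      rw [List.dropLast_cons_of_ne_nil (by simp)]
      simp only [List.foldl_cons]
      have hdrop : (String.ofList t :: List.map String.ofList (u :: rest2)).drop
          ((String.ofList t :: List.map String.ofList (u :: rest2)).length - 1)
          = (List.map String.ofList (u :: rest2)).drop
            ((List.map String.ofList (u :: rest2)).length - 1) := by
        simp
      rw [hdrop]
      have hih := ih (by simp) (pvStepB (items, buf, bal) (String.ofList t)).1
        (pvStepB (items, buf, bal) (String.ofList t)).2.1
        (pvStepB (items, buf, bal) (String.ofList t)).2.2
      simp only [Prod.mk.eta] at hih
      rw [hih]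
      rw [pvBrun_cons_cons]
      simp only [pvStepB]
      by_cases hb : bal + pvTokBal (String.ofList t) = 0
      · rw [if_pos hb, if_pos hb, hb]
      · rw [if_neg hb, if_neg hb]

-- ===== VERDICT (by name: the statement is the Claim_ definition above) =====
theorem split_toml_array_py_spec : Claim_equal_split_toml_array_py := by
  intro s _
  unfold Spec_split_toml_array_py
  have hts : pvSplitC s.toList ≠ [] := pvSplitC_ne_nil _
  have hA : split_toml_array_py s = pvBrun (pvSplitC s.toList) [] [] 0 := by
    have hm := pvMain (pvSplitC s.toList) hts (pvSplitC_no_comma s.toList) [] []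
    rw [pvJoin_splitC] at hm
    unfold split_toml_array_py
    simpa [pvBalS, pvFlat] using hm
  have hB : split_toml_array_py_alt s = pvBrun (pvSplitC s.toList) [] [] 0 := by
    have hp : (PySem.Str.split? s ",").getD [] = (pvSplitC s.toList).map String.ofList := by
      rw [PySem.Str.split?]
      rw [show ("," : String).toList = [','] from rfl]
      rw [PySem.Chars.split?, if_neg (by simp)]
      simp [pvSplitOn_comma]
    simp only [split_toml_array_py_alt, hp, PySem.List.slice_to_neg_one,
      PySem.List.slice_from_neg_one]
    exact pvBrun_spec (pvSplitC s.toList) hts [] [] 0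
  rw [hA, hB]
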